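-- pv_equiv track=rewrite | github.com/kweaver-ai/kweaver-eval | tests/adp/agent/conftest.py | _pick_llm
-- ===== SOURCE A (Python) =====
-- _LLM_PRIORITY = ["qwen3-80b", "deepseek_v3", "deepseek"]
--
-- def _pick_llm(models: list[dict]) -> tuple[str, str] | None:
--     """Pick best LLM by priority: qwen3-80b > deepseek > any.
--
--     Returns (model_id, model_name) or None.
--     """
--     by_name: dict[str, tuple[str, str]] = {}
--     for m in models:
--         name = str(m.get("model_name", "")).lower()
--         mid = str(m.get("model_id") or "")
--         mname = str(m.get("model_name") or "")
--         if mid: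
--             by_name[name] = (mid, mname)
--
--     for pref in _LLM_PRIORITY:
--         for name, pair in by_name.items():
--             if pref in name:
--                 return pair
--     # Fallback: first available LLM
--     return next(iter(by_name.values()), None)
-- ===== SOURCE B (Python) =====
-- _LLM_PRIORITY = ["qwen3-80b", "deepseek_v3", "deepseek"]
--
-- def _pick_llm(models: list[dict]) -> tuple[str, str] | None:
--     """Pick best LLM by priority: qwen3-80b > deepseek > any.
--
--     Same by_name construction as before, then ONE argmin pass over the
--     entries: rank = index of the first priority prefix occurring in the
--     name (len(_LLM_PRIORITY) if none); strictly-smaller-rank updates keep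
--     the earliest entry on ties and make the no-match case fall back to
--     the first entry.
--     """
--     by_name: dict[str, tuple[str, str]] = {}
--     for m in models:
--         name = str(m.get("model_name", "")).lower()
--         mid = str(m.get("model_id") or "")
--         mname = str(m.get("model_name") or "")
--         if mid:
--             by_name[name] = (mid, mname)
--
--     best = None
--     best_rank = len(_LLM_PRIORITY) + 1
--     for name, pair in by_name.items():
--         rank = next((i for i, p in enumerate(_LLM_PRIORITY) if p in name),
--                     len(_LLM_PRIORITY))
--         if rank < best_rank:
--             best, best_rank = pair, rank
--     return best
-- ===== Notes on version B (the rewrite author's own statement) =====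
-- stated objective: alternative
-- what changed: The by_name dict is built the same way, but the three priority scans plus fallback are replaced by a single argmin pass that gives each entry a rank (index of the first matching priority prefix, or len(_LLM_PRIORITY)) and keeps the earliest entry with the strictly smallest rank.
import Mathlib
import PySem

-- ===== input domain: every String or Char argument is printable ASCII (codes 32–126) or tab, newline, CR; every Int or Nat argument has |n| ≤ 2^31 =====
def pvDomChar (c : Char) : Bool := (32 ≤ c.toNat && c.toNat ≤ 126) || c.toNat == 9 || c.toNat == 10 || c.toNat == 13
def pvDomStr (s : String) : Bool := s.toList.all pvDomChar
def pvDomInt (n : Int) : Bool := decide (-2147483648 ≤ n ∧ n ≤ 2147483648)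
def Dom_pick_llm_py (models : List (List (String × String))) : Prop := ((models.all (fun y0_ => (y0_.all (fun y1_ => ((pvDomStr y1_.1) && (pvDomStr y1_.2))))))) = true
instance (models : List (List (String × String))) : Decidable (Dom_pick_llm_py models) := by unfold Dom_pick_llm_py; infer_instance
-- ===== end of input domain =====

-- B replaces A's three priority scans over by_name (plus a first-value fallback) by a single
-- argmin-by-rank pass over by_name.items(); the by_name construction itself is shared verbatim.

def pvPriority : List String := ["qwen3-80b", "deepseek_v3", "deepseek"]

-- by_name construction: the first phase of BOTH Pythons, identical line for line, so shared here.
def pvByName (models : List (List (String × String))) : PySem.Dict String (String × String) :=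
  models.foldl (fun d m =>
    let md := PySem.Dict.mk m
    let name := PySem.Str.lower (md.getD "model_name" "")
    let mid := md.getD "model_id" ""
    let mname := md.getD "model_name" ""
    if mid ≠ "" then d.insert name (mid, mname) else d) PySem.Dict.empty

-- ===== PORT A =====
-- inner loop: 'for name, pair in by_name.items(): if pref in name: return pair'
def pickLoopInner (pref : String) : List (String × (String × String)) → Option (String × String)
  | [] => none
  | (name, pair) :: rest =>
    if PySem.Str.isIn pref name then some pair else pickLoopInner pref rest

-- outer loop: 'for pref in _LLM_PRIORITY: …'
def pickLoopOuter : List String → List (String × (String × String)) → Option (String × String)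
  | [], _ => none
  | p :: ps, items =>
    match pickLoopInner p items with
    | some pair => some pair
    | none => pickLoopOuter ps items

def pick_llm_py (models : List (List (String × String))) : Option (String × String) :=
  let by_name := pvByName models
  match pickLoopOuter pvPriority by_name.items with
  | some pair => some pair
  | none => by_name.values.head?    -- next(iter(by_name.values()), None)

-- ===== PORT B =====
-- rank = next((i for i, p in enumerate(_LLM_PRIORITY) if p in name), len(_LLM_PRIORITY))
def pvRank (name : String) : Nat :=
  (pvPriority.findIdx? (fun p => PySem.Str.isIn p name)).getD pvPriority.length

def pick_llm_py_alt (models : List (List (String × String))) : Option (String × String) :=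
  let by_name := pvByName models
  (by_name.items.foldl
      (fun acc x => if pvRank x.1 < acc.2 then (some x.2, pvRank x.1) else acc)
      ((none : Option (String × String)), pvPriority.length + 1)).1

-- ===== PRECONDITION & SPEC =====
def Spec_pick_llm_py (models : List (List (String × String))) (out : Option (String × String)) : Prop := out = pick_llm_py_alt models
instance (models : List (List (String × String))) (out : Option (String × String)) : Decidable (Spec_pick_llm_py models out) := by unfold Spec_pick_llm_py; infer_instance

-- ===== CLAIM (what is proved, stated in full; the proofs are below) =====
def Claim_equal_pick_llm_py : Prop := ∀ (models : List (List (String × String))), Dom_pick_llm_py models → Spec_pick_llm_py models (pick_llm_py models)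

-- ===== LEMMAS AND PROOFS =====

-- B's fold step and the minimum rank of an item list (4 = pvPriority.length + 1 if empty)
def pvStep (acc : Option (String × String) × Nat) (x : String × (String × String)) :
    Option (String × String) × Nat :=
  if pvRank x.1 < acc.2 then (some x.2, pvRank x.1) else acc

def pvMinR (items : List (String × (String × String))) : Nat :=
  items.foldr (fun x m => min (pvRank x.1) m) 4

theorem pvRank_eq (n : String) :
    pvRank n = if PySem.Str.isIn "qwen3-80b" n then 0
      else if PySem.Str.isIn "deepseek_v3" n then 1
      else if PySem.Str.isIn "deepseek" n then 2 else 3 := by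
  simp [pvRank, pvPriority, List.findIdx?, List.findIdx?.go]
  split_ifs <;> simp_all

theorem pvRank_le_three (n : String) : pvRank n ≤ 3 := by
  rw [pvRank_eq]; split_ifs <;> omega

theorem pvMinR_le_of_mem {items : List (String × (String × String))} {x}
    (hx : x ∈ items) : pvMinR items ≤ pvRank x.1 := by
  induction items with
  | nil => cases hx
  | cons y ys ih =>
    rw [List.mem_cons] at hx
    rcases hx with rfl | h
    · simp only [pvMinR, List.foldr]; omega
    · have := ih h
      simp only [pvMinR, List.foldr] at *
      omega

theorem le_pvMinR {items : List (String × (String × String))} {k : Nat}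
    (hk : k ≤ 4) (h : ∀ x ∈ items, k ≤ pvRank x.1) : k ≤ pvMinR items := by
  induction items with
  | nil => simpa [pvMinR] using hk
  | cons y ys ih =>
    have h1 := h y (by simp)
    have h2 : k ≤ pvMinR ys := ih (fun x hx => h x (by simp [hx]))
    simp only [pvMinR, List.foldr] at *
    omega

theorem pvFold_eq (items : List (String × (String × String)))
    (acc : Option (String × String) × Nat) (hacc : acc.2 ≤ 4) :
    (items.foldl pvStep acc).1 =
      if pvMinR items < acc.2 then
        (items.find? (fun x => pvRank x.1 == pvMinR items)).map Prod.snd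
      else acc.1 := by
  induction items generalizing acc with
  | nil =>
    have : ¬ (4 < acc.2) := by omega
    simp [pvMinR, this]
  | cons x xs ih =>
    have hr3 := pvRank_le_three x.1
    have hmin : pvMinR (x :: xs) = min (pvRank x.1) (pvMinR xs) := rfl
    rw [List.foldl_cons]
    by_cases hlt : pvRank x.1 < acc.2
    · have hstep : pvStep acc x = (some x.2, pvRank x.1) := by simp [pvStep, hlt]
      rw [hstep, ih _ (by simp; omega)]
      by_cases hxs : pvMinR xs < pvRank x.1
      · have hm : pvMinR (x :: xs) = pvMinR xs := by rw [hmin]; omega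
        rw [if_pos hxs, if_pos (by omega), hm,
          List.find?_cons_of_neg (by simp; omega)]
      · have hm : pvMinR (x :: xs) = pvRank x.1 := by rw [hmin]; omega
        rw [if_neg hxs, if_pos (by omega), hm,
          List.find?_cons_of_pos (by simp)]
        rfl
    · have hstep : pvStep acc x = acc := by simp [pvStep, hlt]
      rw [hstep, ih _ hacc]
      by_cases hxs : pvMinR xs < acc.2
      · have hm : pvMinR (x :: xs) = pvMinR xs := by rw [hmin]; omega
        rw [if_pos hxs, if_pos (by omega), hm,
          List.find?_cons_of_neg (by simp; omega)]
      · rw [if_neg hxs, if_neg (by rw [hmin]; omega)]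

theorem pickLoopInner_eq (p : String) (items : List (String × (String × String))) :
    pickLoopInner p items = (items.find? (fun x => PySem.Str.isIn p x.1)).map Prod.snd := by
  induction items with
  | nil => rfl
  | cons x xs ih =>
    obtain ⟨n, pr⟩ := x
    cases hc : PySem.Chars.isIn p.toList n.toList <;>
      simp [pickLoopInner, hc, ih]

theorem pvFind?_congr {α : Type} {p q : α → Bool} : ∀ {l : List α},
    (∀ x ∈ l, p x = q x) → l.find? p = l.find? q
  | [], _ => rfl
  | x :: xs, h => by
    rw [List.find?_cons, List.find?_cons, h x (List.mem_cons_self),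
      pvFind?_congr (fun y hy => h y (List.mem_cons_of_mem _ hy))]

theorem pvRank_zero_beq (n : String) :
    (pvRank n == 0) = PySem.Str.isIn "qwen3-80b" n := by
  rw [pvRank_eq]
  cases h : PySem.Str.isIn "qwen3-80b" n
  · rw [if_neg (by decide)]; split_ifs <;> rfl
  · rfl

theorem pvRank_one_beq (n : String) (h0 : PySem.Str.isIn "qwen3-80b" n = false) :
    (pvRank n == 1) = PySem.Str.isIn "deepseek_v3" n := by
  rw [pvRank_eq, h0, if_neg (by decide)]
  cases h : PySem.Str.isIn "deepseek_v3" n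
  · rw [if_neg (by decide)]; split_ifs <;> rfl
  · rfl

theorem pvRank_two_beq (n : String) (h0 : PySem.Str.isIn "qwen3-80b" n = false)
    (h1 : PySem.Str.isIn "deepseek_v3" n = false) :
    (pvRank n == 2) = PySem.Str.isIn "deepseek" n := by
  rw [pvRank_eq, h0, if_neg (by decide), h1, if_neg (by decide)]
  cases h : PySem.Str.isIn "deepseek" n
  · rw [if_neg (by decide)]; rfl
  · rfl

theorem pvRank_of_c0 {n : String} (h : PySem.Str.isIn "qwen3-80b" n = true) :
    pvRank n = 0 := by rw [pvRank_eq, if_pos h]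

theorem pvRank_of_c1 {n : String} (h0 : PySem.Str.isIn "qwen3-80b" n = false)
    (h : PySem.Str.isIn "deepseek_v3" n = true) : pvRank n = 1 := by
  rw [pvRank_eq, h0, if_neg (by decide), if_pos h]

theorem pvRank_of_c2 {n : String} (h0 : PySem.Str.isIn "qwen3-80b" n = false)
    (h1 : PySem.Str.isIn "deepseek_v3" n = false)
    (h : PySem.Str.isIn "deepseek" n = true) : pvRank n = 2 := by
  rw [pvRank_eq, h0, if_neg (by decide), h1, if_neg (by decide), if_pos h]

theorem pvRank_ge_one {n : String} (h0 : PySem.Str.isIn "qwen3-80b" n = false) :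
    1 ≤ pvRank n := by
  rw [pvRank_eq, h0, if_neg (by decide)]; split_ifs <;> omega

theorem pvRank_ge_two {n : String} (h0 : PySem.Str.isIn "qwen3-80b" n = false)
    (h1 : PySem.Str.isIn "deepseek_v3" n = false) : 2 ≤ pvRank n := by
  rw [pvRank_eq, h0, if_neg (by decide), h1, if_neg (by decide)]; split_ifs <;> omega

theorem pvRank_of_none {n : String} (h0 : PySem.Str.isIn "qwen3-80b" n = false)
    (h1 : PySem.Str.isIn "deepseek_v3" n = false)
    (h2 : PySem.Str.isIn "deepseek" n = false) : pvRank n = 3 := by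
  rw [pvRank_eq, h0, if_neg (by decide), h1, if_neg (by decide), h2, if_neg (by decide)]

theorem pvChain_eq (items : List (String × (String × String))) :
    (match pickLoopOuter pvPriority items with
      | some pair => some pair
      | none => (items.map Prod.snd).head?) =
    (items.foldl pvStep ((none : Option (String × String)), 4)).1 := by
  rw [pvFold_eq _ _ (by norm_num)]
  have houter : pickLoopOuter pvPriority items =
      match pickLoopInner "qwen3-80b" items with
      | some pair => some pair
      | none => match pickLoopInner "deepseek_v3" items with
        | some pair => some pair
        | none => match pickLoopInner "deepseek" items with
          | some pair => some pair
          | none => none := by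
    simp [pvPriority, pickLoopOuter]
  rw [houter, pickLoopInner_eq, pickLoopInner_eq, pickLoopInner_eq]
  cases h0 : items.find? (fun x => PySem.Str.isIn "qwen3-80b" x.1) with
  | some y =>
    have hy : PySem.Str.isIn "qwen3-80b" y.1 = true :=
      List.find?_some (p := fun x : String × (String × String) => PySem.Str.isIn "qwen3-80b" x.1) h0
    have hmem : y ∈ items := List.mem_of_find?_eq_some h0
    have hm : pvMinR items = 0 := by
      have h := pvMinR_le_of_mem hmem
      rw [pvRank_of_c0 hy] at h; omega
    have hcongr := pvFind?_congr (p := fun x : String × (String × String) => pvRank x.1 == 0)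
      (q := fun x => PySem.Str.isIn "qwen3-80b" x.1) (l := items) (fun x _ => pvRank_zero_beq x.1)
    rw [hm, hcongr, h0]
    rfl
  | none =>
    have hall0 : ∀ x ∈ items, PySem.Str.isIn "qwen3-80b" x.1 = false := by
      intro x hx
      exact Bool.eq_false_iff.mpr (List.find?_eq_none.mp h0 x hx)
    cases h1 : items.find? (fun x => PySem.Str.isIn "deepseek_v3" x.1) with
    | some y =>
      have hy : PySem.Str.isIn "deepseek_v3" y.1 = true :=
        List.find?_some (p := fun x : String × (String × String) => PySem.Str.isIn "deepseek_v3" x.1) h1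
      have hmem : y ∈ items := List.mem_of_find?_eq_some h1
      have hm : pvMinR items = 1 := by
        have ha := pvMinR_le_of_mem hmem
        rw [pvRank_of_c1 (hall0 y hmem) hy] at ha
        have hb := le_pvMinR (by omega) (fun x hx => pvRank_ge_one (hall0 x hx))
        omega
      have hcongr := pvFind?_congr (p := fun x : String × (String × String) => pvRank x.1 == 1)
        (q := fun x => PySem.Str.isIn "deepseek_v3" x.1) (l := items)
        (fun x hx => pvRank_one_beq x.1 (hall0 x hx))
      rw [hm, hcongr, h1]
      rfl
    | none =>
      have hall1 : ∀ x ∈ items, PySem.Str.isIn "deepseek_v3" x.1 = false := by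
        intro x hx
        exact Bool.eq_false_iff.mpr (List.find?_eq_none.mp h1 x hx)
      cases h2 : items.find? (fun x => PySem.Str.isIn "deepseek" x.1) with
      | some y =>
        have hy : PySem.Str.isIn "deepseek" y.1 = true :=
          List.find?_some (p := fun x : String × (String × String) => PySem.Str.isIn "deepseek" x.1) h2
        have hmem : y ∈ items := List.mem_of_find?_eq_some h2
        have hm : pvMinR items = 2 := by
          have ha := pvMinR_le_of_mem hmem
          rw [pvRank_of_c2 (hall0 y hmem) (hall1 y hmem) hy] at ha
          have hb := le_pvMinR (by omega)
            (fun x hx => pvRank_ge_two (hall0 x hx) (hall1 x hx))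
          omega
        have hcongr := pvFind?_congr (p := fun x : String × (String × String) => pvRank x.1 == 2)
          (q := fun x => PySem.Str.isIn "deepseek" x.1) (l := items)
          (fun x hx => pvRank_two_beq x.1 (hall0 x hx) (hall1 x hx))
        rw [hm, hcongr, h2]
        rfl
      | none =>
        have hall2 : ∀ x ∈ items, PySem.Str.isIn "deepseek" x.1 = false := by
          intro x hx
          have := List.find?_eq_none.mp h2 x hx
          simpa using this
        have heq3 : ∀ x ∈ items, pvRank x.1 = 3 := fun x hx =>
          pvRank_of_none (hall0 x hx) (hall1 x hx) (hall2 x hx)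
        cases items with
        | nil => simp [pvMinR]
        | cons z zs =>
          have hm : pvMinR (z :: zs) = 3 := by
            have ha := pvMinR_le_of_mem (List.mem_cons_self (l := zs) (a := z))
            rw [heq3 z List.mem_cons_self] at ha
            have hb := le_pvMinR (k := 3) (by omega)
              (fun x hx => by rw [heq3 x hx])
            omega
          rw [hm, List.find?_cons_of_pos (by rw [heq3 z List.mem_cons_self]; rfl)]
          rfl

-- ===== VERDICT (by name: the statement is the Claim_ definition above) =====
theorem pick_llm_py_spec : Claim_equal_pick_llm_py := by
  intro models _
  unfold Spec_pick_llm_py pick_llm_py pick_llm_py_alt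
  have h := pvChain_eq (pvByName models).items
  simpa [PySem.Dict.values, pvPriority] using h
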